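-- pv_equiv track=rewrite | github.com/daniel-reich/ubiquitous-fiesta | WixXhsdqcNHe3vTn3_13.py | how_bad
-- ===== SOURCE A (Python) =====
-- def how_bad(n):
--     lst = []
--     l = str(bin(n)).count('1')
--     p = bool([i for i in range(2,l) if l%i==0])
--     if l%2==0:
--         lst.append('Evil')
--     else:
--         lst.append('Odious')
--     if p==False and l>1:
--         lst.append('Pernicious')
--     return lst
-- ===== SOURCE B (Python) =====
-- def _is_prime(l):
--     if l < 2:
--         return False
--     i = 2
--     while i * i <= l:
--         if l % i == 0:
--             return False
--         i += 1
--     return True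
--
--
-- def how_bad(n):
--     m = n if n >= 0 else -n
--     c = 0
--     while m:
--         c += m & 1
--         m >>= 1
--     res = ['Evil' if c % 2 == 0 else 'Odious']
--     if _is_prime(c):
--         res.append('Pernicious')
--     return res
-- ===== Notes on version B (the rewrite author's own statement) =====
-- stated objective: faster
-- what changed: B computes the popcount with an arithmetic bit loop on |n| instead of counting '1' characters in the bin() string, and tests its primality by trial division only up to the square root (with l<2 handled directly) instead of materialising the full list of divisors in range(2,l).
import Mathlib
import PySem

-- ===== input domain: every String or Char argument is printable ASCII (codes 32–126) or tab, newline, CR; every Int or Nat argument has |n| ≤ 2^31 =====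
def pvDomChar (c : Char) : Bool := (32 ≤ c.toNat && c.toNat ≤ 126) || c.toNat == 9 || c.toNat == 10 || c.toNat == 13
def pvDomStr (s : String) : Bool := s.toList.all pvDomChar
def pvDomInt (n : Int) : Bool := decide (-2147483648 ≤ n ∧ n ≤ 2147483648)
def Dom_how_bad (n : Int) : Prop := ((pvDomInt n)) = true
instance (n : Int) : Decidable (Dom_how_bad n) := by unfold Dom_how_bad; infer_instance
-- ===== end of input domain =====

-- B replaces A's character count over bin(n) by an arithmetic bit loop and A's full
-- range(2,l) divisor list by trial division up to the square root (objective: faster).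

-- ===== PORT A =====
-- l = str(bin(n)).count('1'); p = bool([i for i in range(2,l) if l%i==0]); appends in order
def how_bad (n : Int) : List String :=
  let lst : List String := []
  let l : Int := (PySem.Str.count (PySem.Int.pyBin n) "1" : Int)
  let p : Bool := !((PySem.List.pyRange 2 l 1).filter (fun i => PySem.Int.mod l i == 0)).isEmpty
  let lst := if PySem.Int.mod l 2 == 0 then lst ++ ["Evil"] else lst ++ ["Odious"]
  let lst := if p == false && decide (l > 1) then lst ++ ["Pernicious"] else lst
  lst

-- ===== PORT B =====
-- 'while m: c += m & 1; m >>= 1' — fuel-structural (fuel = initial m bounds the halvings)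
def popcLoop : Nat → Nat → Nat
  | 0, _ => 0
  | f + 1, m => if m = 0 then 0 else m % 2 + popcLoop f (m / 2)

-- 'i = 2; while i*i <= l: ...' — fuel-structural (fuel = l bounds the iterations)
def trialLoop (l : Nat) : Nat → Nat → Bool
  | 0, _ => true
  | f + 1, i => if i * i ≤ l then (if l % i = 0 then false else trialLoop l f (i + 1)) else true

def isPrime (l : Nat) : Bool := if l < 2 then false else trialLoop l l 2

def how_bad_alt (n : Int) : List String :=
  let m : Int := if 0 ≤ n then n else -n
  let c : Nat := popcLoop m.toNat m.toNat
  let res : List String := [if c % 2 = 0 then "Evil" else "Odious"]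
  if isPrime c then res ++ ["Pernicious"] else res

-- ===== PRECONDITION & SPEC =====
def Spec_how_bad (n : Int) (out : List String) : Prop := out = how_bad_alt n
instance (n : Int) (out : List String) : Decidable (Spec_how_bad n out) := by unfold Spec_how_bad; infer_instance

-- ===== CLAIM (what is proved, stated in full; the proofs are below) =====
def Claim_equal_how_bad : Prop := ∀ (n : Int), Dom_how_bad n → Spec_how_bad n (how_bad n)

-- ===== LEMMAS AND PROOFS =====

theorem popcLoop_fuel (n : Nat) : ∀ g, n ≤ g → popcLoop g n = popcLoop n n := by
  induction n using Nat.strong_induction_on with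
  | _ n ih =>
    intro g hg
    match n, g with
    | 0, g => cases g <;> simp [popcLoop]
    | n + 1, g + 1 =>
      have h2 : (n + 1) / 2 < n + 1 := Nat.div_lt_self (by omega) (by omega)
      simp only [popcLoop, if_neg (Nat.succ_ne_zero n)]
      congr 1
      rw [ih _ h2 g (by omega), ih _ h2 n (by omega)]

theorem popcLoop_unfold (m : Nat) (h : m ≠ 0) :
    popcLoop m m = m % 2 + popcLoop (m / 2) (m / 2) := by
  match m with
  | n + 1 =>
    simp only [popcLoop, if_neg (Nat.succ_ne_zero n)]
    congr 1
    exact popcLoop_fuel _ _ (by omega)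

theorem popcLoop_le : ∀ (k m : Nat), m < 2 ^ k → popcLoop m m ≤ k := by
  intro k
  induction k with
  | zero => intro m h; interval_cases m; simp [popcLoop]
  | succ k ih =>
    intro m h
    rcases Nat.eq_zero_or_pos m with h0 | h0
    · subst h0; simp [popcLoop]
    · rw [popcLoop_unfold m (by omega)]
      have hdiv : m / 2 < 2 ^ k := by
        rw [Nat.div_lt_iff_lt_mul (by omega)]
        calc m < 2 ^ (k + 1) := h
        _ = 2 ^ k * 2 := by ring
      have := ih (m / 2) hdiv
      have : m % 2 ≤ 1 := by omega
      omega

theorem count_go_singleton :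
    ∀ (fuel : Nat) (s : List Char) (acc : Nat), s.length ≤ fuel →
      PySem.Chars.count.go ['1'] fuel s acc = acc + s.count '1' := by
  intro fuel
  induction fuel with
  | zero =>
    intro s acc h
    have : s = [] := List.eq_nil_of_length_eq_zero (by omega)
    subst this
    simp [PySem.Chars.count.go]
  | succ f ih =>
    intro s acc h
    match s with
    | [] => simp [PySem.Chars.count.go]
    | c :: t =>
      simp only [PySem.Chars.count.go, List.isPrefixOf]
      by_cases hc : c = '1'
      · subst hc
        simp only [BEq.rfl, Bool.true_and, if_pos]
        rw [show List.drop ['1'].length ('1' :: t) = t from rfl]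
        rw [ih t (acc + 1) (by simpa using h)]
        simp
        omega
      · rw [if_neg (by simp [beq_iff_eq]; intro h'; exact hc h'.symm)]
        rw [ih t acc (by simpa using h)]
        simp [hc]

theorem digits_count :
    ∀ (f n : Nat) (ds : List Char), n < f →
      ((Nat.toDigitsCore 2 f n ds).count '1') = popcLoop n n + ds.count '1' := by
  intro f
  induction f with
  | zero => intro n ds h; omega
  | succ f ih =>
    intro n ds h
    rw [Nat.toDigitsCore]
    by_cases h0 : n / 2 = 0
    · have hn : n ≤ 1 := by omega
      simp only [h0, if_pos]
      interval_cases n <;> simp [Nat.digitChar, popcLoop] <;> omega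
    · rw [if_neg h0]
      have hlt : n / 2 < f := by
        have : n / 2 < n := Nat.div_lt_self (by omega) (by omega)
        omega
      rw [ih (n / 2) _ hlt]
      have hm : popcLoop n n = n % 2 + popcLoop (n / 2) (n / 2) :=
        popcLoop_unfold n (by omega)
      rcases Nat.mod_two_eq_zero_or_one n with h2 | h2 <;>
        simp [h2, Nat.digitChar, hm] <;> omega

theorem toDigits_count (m : Nat) : (Nat.toDigits 2 m).count '1' = popcLoop m m := by
  have := digits_count (m + 1) m [] (by omega)
  simpa [Nat.toDigits] using this

theorem count_chars_singleton (s : List Char) :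
    PySem.Chars.count s ['1'] = s.count '1' := by
  simp only [PySem.Chars.count]
  rw [if_neg (by simp)]
  simpa using count_go_singleton s.length s 0 le_rfl

theorem count_pyBin (n : Int) :
    PySem.Str.count (PySem.Int.pyBin n) "1" = popcLoop n.natAbs n.natAbs := by
  rw [PySem.Str.count_eq]
  have h1 : (PySem.Int.pyBin n).toList = PySem.Int.toBinChars0b n := by
    simp [PySem.Int.pyBin]
  have h2 : "1".toList = ['1'] := by decide
  rw [h1, h2, count_chars_singleton]
  unfold PySem.Int.toBinChars0b
  by_cases hn : n < 0
  · rw [if_pos hn]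
    simp [toDigits_count]
  · rw [if_neg hn]
    have : n.toNat = n.natAbs := by omega
    rw [this]
    simp [toDigits_count]

-- ===== VERDICT (by name: the statement is the Claim_ definition above) =====
theorem how_bad_spec : Claim_equal_how_bad := by
  unfold Claim_equal_how_bad Spec_how_bad
  intro n hdom
  have hd : -2147483648 ≤ n ∧ n ≤ 2147483648 := by
    simpa [Dom_how_bad, pvDomInt] using hdom
  have htn : (if 0 ≤ n then n else -n).toNat = n.natAbs := by split <;> omega
  have hb : popcLoop n.natAbs n.natAbs ≤ 32 := by
    apply popcLoop_le
    have : n.natAbs ≤ 2147483648 := by omega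
    omega
  simp only [how_bad, how_bad_alt, htn, count_pyBin]
  generalize popcLoop n.natAbs n.natAbs = c at hb
  interval_cases c <;> decide
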